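-- pv_equiv track=rewrite | github.com/pauloxnet/lvfs-website | lvfs/dbutils.py | _make_boring
-- ===== SOURCE A (Python) =====
-- def _make_boring(val):
--     out = ''
--     for v in val.lower():
--         if 'a' <= v <= 'z':
--             out += v
--         elif v == ' ' and not out.endswith('_'):
--             out += '_'
--     for suffix in ['_company',
--                    '_corporation',
--                    '_enterprises',
--                    '_incorporated',
--                    '_industries',
--                    '_international',
--                    '_limited',
--                    '_services',
--                    '_studios',
--                    '_inc']:
--         out = out.replace(suffix, '')
--     return out
-- ===== SOURCE B (Python) =====
-- _SUFFIXES = ['_company',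
--              '_corporation',
--              '_enterprises',
--              '_incorporated',
--              '_industries',
--              '_international',
--              '_limited',
--              '_services',
--              '_studios',
--              '_inc']
--
--
-- def _make_boring(val):
--     # pass 1: keep only lowercase letters and spaces
--     kept = [c for c in val.lower() if 'a' <= c <= 'z' or c == ' ']
--     # pass 2: collapse each run of spaces into a single underscore
--     chars = []
--     i = 0
--     n = len(kept)
--     while i < n:
--         if kept[i] == ' ':
--             chars.append('_')
--             while i < n and kept[i] == ' ':
--                 i += 1
--         else:
--             chars.append(kept[i])
--             i += 1
--     out = ''.join(chars)
--     for suffix in _SUFFIXES: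
--         out = out.replace(suffix, '')
--     return out
-- ===== Notes on version B (the rewrite author's own statement) =====
-- stated objective: alternative
-- what changed: Replaces A's single stateful character loop (which decides per space via whether out already ends with an underscore) by two stateless passes: filter out every char that is not a lowercase letter or space, then collapse each run of spaces into one underscore; the ordered suffix-stripping loop is kept as is.
import Mathlib
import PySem

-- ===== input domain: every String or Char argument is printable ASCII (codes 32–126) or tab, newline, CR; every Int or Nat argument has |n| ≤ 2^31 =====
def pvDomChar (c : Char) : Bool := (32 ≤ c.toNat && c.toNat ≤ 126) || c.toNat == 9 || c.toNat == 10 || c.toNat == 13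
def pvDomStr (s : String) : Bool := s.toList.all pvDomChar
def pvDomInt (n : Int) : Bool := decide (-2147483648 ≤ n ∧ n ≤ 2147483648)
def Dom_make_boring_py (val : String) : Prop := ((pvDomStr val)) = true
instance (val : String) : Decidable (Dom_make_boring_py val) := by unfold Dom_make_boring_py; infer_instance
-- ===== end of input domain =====

-- B replaces A's single stateful char loop (conditioned on whether out already ends with an underscore) by a filter pass
-- plus a collapse-runs-of-spaces pass; suffix stripping is unchanged. Objective: alternative.

-- ===== PORT A =====
-- A's loop body: append letters; append '_' for a space unless out already ends with '_'
def aStep (out : List Char) (v : Char) : List Char :=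
  if 'a' ≤ v ∧ v ≤ 'z' then out ++ [v]
  else if v = ' ' ∧ ¬ (PySem.Chars.endswith out ['_'] = true) then out ++ ['_']
  else out

def make_boring_py (val : String) : String :=
  let out : List Char := (PySem.Chars.lower val.toList).foldl aStep []
  let out := ["_company", "_corporation", "_enterprises", "_incorporated",
              "_industries", "_international", "_limited", "_services",
              "_studios", "_inc"].foldl
    (fun out suffix => PySem.Chars.replace out suffix.toList []) out
  String.ofList out

-- ===== PORT B =====
def bKeep (c : Char) : Bool := ('a' ≤ c && c ≤ 'z') || c == ' '

-- collapse: each run of spaces becomes a single '_' (Source B's while loop with the inner skip)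
def bCollapse : List Char → List Char
  | [] => []
  | c :: rest =>
    if c = ' ' then '_' :: bCollapse (rest.dropWhile (· = ' '))
    else c :: bCollapse rest
termination_by l => l.length
decreasing_by
  · simpa using Nat.lt_succ_of_le (List.length_dropWhile_le _ _)
  · simp

def bSuffixes : List String :=
  ["_company", "_corporation", "_enterprises", "_incorporated",
   "_industries", "_international", "_limited", "_services",
   "_studios", "_inc"]

def make_boring_py_alt (val : String) : String :=
  let kept := (PySem.Chars.lower val.toList).filter bKeep
  let out := bCollapse kept
  let out := bSuffixes.foldl (fun out suffix => PySem.Chars.replace out suffix.toList []) out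
  String.ofList out

-- ===== PRECONDITION & SPEC =====
def Spec_make_boring_py (val : String) (out : String) : Prop := out = make_boring_py_alt val
instance (val : String) (out : String) : Decidable (Spec_make_boring_py val out) := by unfold Spec_make_boring_py; infer_instance

-- ===== CLAIM (what is proved, stated in full; the proofs are below) =====
def Claim_equal_make_boring_py : Prop := ∀ (val : String), Dom_make_boring_py val → Spec_make_boring_py val (make_boring_py val)

-- ===== LEMMAS AND PROOFS =====

-- out.endswith('_') after appending one char c reads c
lemma ew_append (out : List Char) (c : Char) :
    PySem.Chars.endswith (out ++ [c]) ['_'] = (c == '_') := by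
  by_cases h : c = '_'
  · subst h; simp [PySem.Chars.endswith_iff]
  · have h2 : ¬ (['_'] <:+ out ++ [c]) := by
      intro hs
      rcases List.suffix_concat_iff.mp hs with h1 | ⟨t, ht, -⟩
      · simp at h1
      · cases t with
        | nil => simp only [List.nil_append, List.cons.injEq] at ht; exact h ht.1.symm
        | cons a t => simp at ht
    rw [show (c == '_') = false by simp [h]]
    exact Bool.eq_false_iff.mpr (fun hb => h2 ((PySem.Chars.endswith_iff _ _).mp hb))

-- A's stateful loop equals B's filter-then-collapse; the pending-underscore state of A
-- corresponds to a dropWhile of the leading spaces on B's side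
lemma core (l : List Char) : ∀ out : List Char,
    l.foldl aStep out = out ++
      (if PySem.Chars.endswith out ['_'] = true
       then bCollapse ((l.filter bKeep).dropWhile (· = ' '))
       else bCollapse (l.filter bKeep)) := by
  induction l with
  | nil => intro out; simp [bCollapse]
  | cons c l ih =>
    intro out
    by_cases hl : 'a' ≤ c ∧ c ≤ 'z'
    · have hsp : ¬ c = ' ' := fun h => absurd (h ▸ hl.1) (by decide)
      have hun : (c == '_') = false := by
        simp; rintro rfl; exact absurd hl.1 (by decide)
      have hk : bKeep c = true := by simp [bKeep]; exact Or.inl hl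
      rw [List.foldl_cons, show aStep out c = out ++ [c] from if_pos hl,
          ih (out ++ [c]), ew_append, hun, List.filter_cons_of_pos hk]
      rw [show bCollapse (c :: l.filter bKeep) = c :: bCollapse (l.filter bKeep) from by
        rw [bCollapse]; simp [hsp]]
      by_cases he : PySem.Chars.endswith out ['_'] = true
      · rw [if_pos he, if_neg (by simp), List.dropWhile_cons_of_neg (by simp [hsp]), List.append_assoc]
        rw [show bCollapse (c :: l.filter bKeep) = c :: bCollapse (l.filter bKeep) from by
          rw [bCollapse]; simp [hsp]]
        simp
      · rw [if_neg he, if_neg (by simp), List.append_assoc]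
        simp
    · by_cases hc : c = ' '
      · subst hc
        have hk : bKeep ' ' = true := by decide
        rw [List.foldl_cons, List.filter_cons_of_pos hk]
        by_cases he : PySem.Chars.endswith out ['_'] = true
        · rw [show aStep out ' ' = out from by
            unfold aStep; rw [if_neg hl, if_neg (by simp [he])]]
          rw [ih out, if_pos he, if_pos he, List.dropWhile_cons_of_pos (by simp)]
        · rw [show aStep out ' ' = out ++ ['_'] from by
            unfold aStep; rw [if_neg hl, if_pos ⟨rfl, he⟩]]
          rw [ih (out ++ ['_']), ew_append, if_neg he]
          rw [show ('_' == '_') = true from rfl, if_pos rfl]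
          rw [show bCollapse (' ' :: l.filter bKeep)
              = '_' :: bCollapse ((l.filter bKeep).dropWhile (· = ' ')) from by
            rw [bCollapse]; simp]
          simp
      · have hk : bKeep c = false := by
          simp [bKeep, hc]; intro h1; exact not_le.mp (fun h2 => hl ⟨h1, h2⟩)
        rw [List.foldl_cons, show aStep out c = out from by
          unfold aStep; rw [if_neg hl, if_neg (by tauto)]]
        rw [ih out, List.filter_cons_of_neg (by simp [hk])]

-- ===== VERDICT (by name: the statement is the Claim_ definition above) =====
theorem make_boring_py_spec : Claim_equal_make_boring_py := by
  intro val _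
  unfold Spec_make_boring_py make_boring_py make_boring_py_alt bSuffixes
  rw [core (PySem.Chars.lower val.toList) [],
      show PySem.Chars.endswith ([] : List Char) ['_'] = false from by decide]
  simp
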